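-- pv_equiv track=rewrite | github.com/stepankovab/Generation-of-Czech-Lyrics-to-Cover-Songs | CODE/garbage/test_taggers.py | _fill_in_none_rhymes
-- ===== SOURCE A (Python) =====
-- def _fill_in_none_rhymes(rhymes):
--     """
--     Rewrites numeric rhyme scheme into capital letters. Fills in different letters for each None tag.
--
--     Parameters:
--     ----------
--     rhymes: list of int or None describing the rhyme scheme
--
--     Returns:
--     ---------
--     rhyme scheme in capital letters
--     """
--     max_rhyme_ref = 0
--     none_ids = []
--     for rhyme_i in range(len(rhymes)):
--         if isinstance(rhymes[rhyme_i], int):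
--             if rhymes[rhyme_i] > max_rhyme_ref:
--                 max_rhyme_ref = rhymes[rhyme_i]
--             # convert to capital letters, start with A
--             rhymes[rhyme_i] = chr(64 + rhymes[rhyme_i])
--         else:
--             none_ids.append(rhyme_i)
--
--     for none_i in none_ids:
--         max_rhyme_ref += 1
--         rhymes[none_i] = chr(64 + max_rhyme_ref)
--
--     return rhymes
-- ===== SOURCE B (Python) =====
-- def _fill_in_none_rhymes(rhymes):
--     """One statistics pass (running max and None count), then fill the list
--     BACK-TO-FRONT: ints become their letter, and each None encountered from
--     the right takes the current counter (starting at max+count) and decrements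
--     it, so Nones still read A, B, ... left-to-right. Mutates rhymes in place."""
--     m = 0
--     nones = 0
--     for r in rhymes:
--         if isinstance(r, int):
--             if r > m:
--                 m = r
--         else:
--             nones += 1
--     c = m + nones
--     for i in range(len(rhymes) - 1, -1, -1):
--         r = rhymes[i]
--         if isinstance(r, int):
--             rhymes[i] = chr(64 + r)
--         else:
--             rhymes[i] = chr(64 + c)
--             c -= 1
--     return rhymes
-- ===== Notes on version B (the rewrite author's own statement) =====
-- stated objective: alternative
-- what changed: A converts ints forward while collecting None indices into a side list and then fills those indices in a second forward pass with an incrementing counter; B takes one statistics pass (running max and None count) and then fills the list back-to-front with a counter that starts at max+count and decrements at each None, so no index list exists.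
import Mathlib
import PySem

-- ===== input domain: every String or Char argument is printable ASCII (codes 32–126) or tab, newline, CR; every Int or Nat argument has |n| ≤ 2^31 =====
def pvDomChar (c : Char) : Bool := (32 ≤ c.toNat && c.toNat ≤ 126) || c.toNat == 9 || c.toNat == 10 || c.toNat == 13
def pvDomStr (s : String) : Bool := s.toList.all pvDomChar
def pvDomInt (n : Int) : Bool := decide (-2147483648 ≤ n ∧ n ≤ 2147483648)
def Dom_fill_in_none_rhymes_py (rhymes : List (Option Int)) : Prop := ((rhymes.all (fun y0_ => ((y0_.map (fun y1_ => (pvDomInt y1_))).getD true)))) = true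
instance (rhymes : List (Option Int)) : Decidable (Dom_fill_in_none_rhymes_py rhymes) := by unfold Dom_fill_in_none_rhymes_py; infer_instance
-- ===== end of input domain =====

-- B replaces A's forward two-pass (convert + collect None indices, then fill the collected
-- indices) by a statistics pass (running max, None count) followed by a BACKWARD fill with a
-- decrementing counter; equivalence is about the RETURN value (both Pythons also mutate
-- `rhymes` in place, identically).

-- ===== PORT A =====

-- chr(n): exact for every n that is a valid Unicode scalar value (Pre_ guarantees this;
-- Python's chr additionally accepts surrogate code points, which Lean Strings cannot hold).
def pvChr (n : Int) : String := String.ofList [Char.ofNat n.toNat]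

-- the list A mutates in place holds ints/Nones (.inl) and already-written strings (.inr)
def pvStepA1 (st : Int × List Int × List (Sum (Option Int) String)) (i : Int) :
    Int × List Int × List (Sum (Option Int) String) :=
  match PySem.List.pyGetD st.2.2 i (Sum.inl none) with  -- rhymes[rhyme_i]; i is always in range
  | Sum.inl (some r) =>
      ((if r > st.1 then r else st.1), st.2.1, PySem.List.pySetD st.2.2 i (Sum.inr (pvChr (64 + r))))
  | _ => (st.1, st.2.1 ++ [i], st.2.2)

def pvStepA2 (st : Int × List (Sum (Option Int) String)) (i : Int) :
    Int × List (Sum (Option Int) String) :=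
  (st.1 + 1, PySem.List.pySetD st.2 i (Sum.inr (pvChr (64 + (st.1 + 1)))))

def fill_in_none_rhymes_py (rhymes : List (Option Int)) : List String :=
  let s := (PySem.List.pyRange 0 rhymes.length 1).foldl pvStepA1 (0, [], rhymes.map Sum.inl)
  let s2 := s.2.1.foldl pvStepA2 (s.1, s.2.2)
  -- after both loops every entry is a written string; extraction is only the type coercion
  s2.2.map (fun e => match e with | Sum.inr s => s | Sum.inl _ => "")

-- ===== PORT B =====

-- first loop of Source B: running max of the int entries and count of the Nones
def pvStats (st : Int × Int) (r : Option Int) : Int × Int :=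
  match r with
  | some v => ((if v > st.1 then v else st.1), st.2)
  | none => (st.1, st.2 + 1)

-- second loop of Source B: descending-index fill, built back-to-front with the counter
def pvStepBrev (r : Option Int) (st : List String × Int) : List String × Int :=
  match r with
  | some v => (pvChr (64 + v) :: st.1, st.2)
  | none => (pvChr (64 + st.2) :: st.1, st.2 - 1)

def fill_in_none_rhymes_py_alt (rhymes : List (Option Int)) : List String :=
  let s := rhymes.foldl pvStats (0, 0)
  (rhymes.foldr pvStepBrev ([], s.1 + s.2)).1

-- ===== PRECONDITION & SPEC =====

-- n is a Unicode scalar value (what a Lean Char can hold; Python's chr also accepts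
-- the surrogate range 0xD800–0xDFFF, excluded here since Lean Strings cannot represent it)
def pvValidCode (n : Int) : Prop := 0 ≤ n ∧ (n < 55296 ∨ (57343 < n ∧ n < 1114112))

def pvMaxRef (rhymes : List (Option Int)) : Int := (rhymes.filterMap id).foldl max 0

-- Pre_ excludes (a) inputs where chr raises ValueError in A (an int below -64 or above
-- 0x10FFFF - 64, or None-fill letters running past 0x10FFFF) and (b) inputs whose output
-- would contain a lone-surrogate code point, where A returns a non-scalar string that a
-- Lean String cannot represent (B returns the identical string there).
def Pre_fill_in_none_rhymes_py (rhymes : List (Option Int)) : Prop :=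
  (∀ r ∈ rhymes.filterMap id, pvValidCode (64 + r)) ∧
  (∀ k ∈ List.range (rhymes.countP (fun o => o.isNone)),
      pvValidCode (64 + pvMaxRef rhymes + (k + 1)))

instance (rhymes : List (Option Int)) : Decidable (Pre_fill_in_none_rhymes_py rhymes) := by
  unfold Pre_fill_in_none_rhymes_py pvValidCode; infer_instance

def pvWitness_fill_in_none_rhymes_py : List (Option Int) := [some 2, none, some 1, none]

def Spec_fill_in_none_rhymes_py (rhymes : List (Option Int)) (out : List String) : Prop := out = fill_in_none_rhymes_py_alt rhymes
instance (rhymes : List (Option Int)) (out : List String) : Decidable (Spec_fill_in_none_rhymes_py rhymes out) := by unfold Spec_fill_in_none_rhymes_py; infer_instance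

-- ===== CLAIM (what is proved, stated in full; the proofs are below) =====
def Claim_equal_fill_in_none_rhymes_py : Prop := ∀ (rhymes : List (Option Int)), Dom_fill_in_none_rhymes_py rhymes → Pre_fill_in_none_rhymes_py rhymes → Spec_fill_in_none_rhymes_py rhymes (fill_in_none_rhymes_py rhymes)

-- ===== LEMMAS AND PROOFS =====

-- indices (as Ints, starting at i0) of the None entries of l
def pvNoneIds (i0 : Int) : List (Option Int) → List Int
  | [] => []
  | some _ :: t => pvNoneIds (i0 + 1) t
  | none :: t => i0 :: pvNoneIds (i0 + 1) t

-- pass-1 image of the list: ints converted, Nones untouched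
def pvConv : List (Option Int) → List (Sum (Option Int) String)
  | [] => []
  | some r :: t => Sum.inr (pvChr (64 + r)) :: pvConv t
  | none :: t => Sum.inl none :: pvConv t

-- the string list both versions produce when the Nones are filled m+1, m+2, … forward
def pvBList (m : Int) : List (Option Int) → List String
  | [] => []
  | some r :: t => pvChr (64 + r) :: pvBList m t
  | none :: t => pvChr (64 + (m + 1)) :: pvBList (m + 1) t

theorem pvStepA1_some (m : Int) (ids : List Int) (cur : List (Sum (Option Int) String))
    (i r : Int) (h : PySem.List.pyGetD cur i (Sum.inl none) = Sum.inl (some r)) :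
    pvStepA1 (m, ids, cur) i
      = ((if r > m then r else m), ids, PySem.List.pySetD cur i (Sum.inr (pvChr (64 + r)))) := by
  simp [pvStepA1, h]

theorem pvStepA1_none (m : Int) (ids : List Int) (cur : List (Sum (Option Int) String))
    (i : Int) (h : PySem.List.pyGetD cur i (Sum.inl none) = Sum.inl none) :
    pvStepA1 (m, ids, cur) i = (m, ids ++ [i], cur) := by
  simp [pvStepA1, h]

theorem pvNoneIds_add (l : List (Option Int)) : ∀ i0 d : Int,
    pvNoneIds (i0 + d) l = (pvNoneIds i0 l).map (· + d) := by
  induction l with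
  | nil => intros; simp [pvNoneIds]
  | cons x t ih =>
    intro i0 d
    cases x <;> simp only [pvNoneIds, List.map_cons]
    · rw [show i0 + d + 1 = (i0 + 1) + d by ring, ih]
    · rw [show i0 + d + 1 = (i0 + 1) + d by ring, ih]

theorem pvNoneIds_shift (l : List (Option Int)) (i0 : Int) :
    pvNoneIds i0 l = (pvNoneIds 0 l).map (· + i0) := by
  have := pvNoneIds_add l 0 i0; simpa using this

theorem pvNoneIds_nonneg (l : List (Option Int)) : ∀ j ∈ pvNoneIds 0 l, 0 ≤ j := by
  induction l with
  | nil => simp [pvNoneIds]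
  | cons x t ih =>
    intro j hj
    cases x <;> simp [pvNoneIds, pvNoneIds_shift t 1] at hj
    · rcases hj with rfl | ⟨a, ha, rfl⟩
      · omega
      · have := ih a ha; omega
    · rcases hj with ⟨a, ha, rfl⟩
      have := ih a ha; omega

-- pass 1, generalized over an already-processed prefix
theorem pvPass1_spec (l : List (Option Int)) :
    ∀ (done : List (Sum (Option Int) String)) (m : Int) (ids : List Int),
    (PySem.List.pyRange (done.length : Int) ((done.length : Int) + l.length) 1).foldl pvStepA1
        (m, ids, done ++ l.map Sum.inl)
      = ((l.filterMap id).foldl (fun a r => if r > a then r else a) m,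
         ids ++ pvNoneIds (done.length : Int) l,
         done ++ pvConv l) := by
  induction l with
  | nil =>
    intro done m ids
    have hnil : PySem.List.pyRange (done.length : Int)
        ((done.length : Int) + (([] : List (Option Int)).length : Int)) 1 = [] :=
      PySem.List.pyRange_one_eq_nil (by simp)
    rw [hnil]
    simp [pvConv, pvNoneIds]
  | cons x t ih =>
    intro done m ids
    have hb : ((done.length : Int) + ((x :: t).length : Int))
        = (((done.length + 1 : Nat) : Int) + (t.length : Int)) := by
      push_cast [List.length_cons]; ring
    have hab : ((done.length : Nat) : Int) < ((done.length + 1 : Nat) : Int) + (t.length : Int) := by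
      push_cast; omega
    rw [hb, PySem.List.pyRange_one_cons hab, List.foldl_cons]
    have hget : PySem.List.pyGetD (done ++ (x :: t).map Sum.inl) ((done.length : Nat) : Int)
        (Sum.inl none) = Sum.inl x := by
      rw [PySem.List.pyGetD_natCast]; simp [List.getD]
    cases x with
    | some r =>
      rw [pvStepA1_some _ _ _ _ _ hget]
      have hset : PySem.List.pySetD (done ++ (some r :: t).map Sum.inl) ((done.length : Nat) : Int)
          (Sum.inr (pvChr (64 + r)))
          = (done ++ [Sum.inr (pvChr (64 + r))]) ++ t.map Sum.inl := by
        rw [PySem.List.pySetD_natCast]; simp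
      have hlen : (done ++ [Sum.inr (pvChr (64 + r))]).length = done.length + 1 := by simp
      rw [hset, show ((done.length : Int) + 1) = ((done.length + 1 : Nat) : Int) by push_cast; ring]
      rw [← hlen]
      rw [ih (done ++ [Sum.inr (pvChr (64 + r))]) (if r > m then r else m) ids]
      simp [pvNoneIds, pvConv, List.append_assoc]
    | none =>
      rw [pvStepA1_none _ _ _ _ hget]
      have hlen : (done ++ [Sum.inl (none : Option Int)]).length = done.length + 1 := by simp
      rw [show done ++ (none :: t).map Sum.inl = (done ++ [Sum.inl none]) ++ t.map Sum.inl by simp]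
      rw [show ((done.length : Int) + 1) = ((done.length + 1 : Nat) : Int) by push_cast; ring]
      rw [← hlen]
      rw [ih (done ++ [Sum.inl none]) m (ids ++ [(done.length : Int)])]
      simp [pvNoneIds, pvConv, List.append_assoc]

-- folding pass 2 over indices shifted by one leaves the head cell alone
theorem pvPass2_shift (js : List Int) (hjs : ∀ j ∈ js, 0 ≤ j) :
    ∀ (m : Int) (c : Sum (Option Int) String) (rest : List (Sum (Option Int) String)),
    (js.map (· + 1)).foldl pvStepA2 (m, c :: rest)
      = ((js.foldl pvStepA2 (m, rest)).1, c :: (js.foldl pvStepA2 (m, rest)).2) := by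
  induction js with
  | nil => intro m c rest; simp
  | cons j t ih =>
    intro m c rest
    have hj : (0:Int) ≤ j := hjs j (by simp)
    have hset : PySem.List.pySetD (c :: rest) (j + 1) (Sum.inr (pvChr (64 + (m + 1))))
        = c :: PySem.List.pySetD rest j (Sum.inr (pvChr (64 + (m + 1)))) := by
      have h1 : (0:Int) ≤ j + 1 := by omega
      rw [PySem.List.pySetD_of_nonneg _ _ h1, PySem.List.pySetD_of_nonneg _ _ hj]
      rw [show (j + 1).toNat = j.toNat + 1 by omega]
      simp
    simp only [List.map_cons, List.foldl_cons, pvStepA2, hset]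
    exact ih (fun a ha => hjs a (by simp [ha])) (m + 1) c _

-- pass 2 on pass 1's output, extracted, is exactly the forward-filled list
theorem pvPass2_spec (l : List (Option Int)) : ∀ m : Int,
    ((pvNoneIds 0 l).foldl pvStepA2 (m, pvConv l)).2.map
        (fun e => match e with | Sum.inr s => s | Sum.inl _ => "")
      = pvBList m l := by
  induction l with
  | nil => intro m; simp [pvNoneIds, pvConv, pvBList]
  | cons x t ih =>
    intro m
    cases x with
    | some r =>
      simp only [pvNoneIds, pvConv, pvBList, zero_add, pvNoneIds_shift t 1]
      rw [pvPass2_shift _ (pvNoneIds_nonneg t) m]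
      simp [ih m]
    | none =>
      simp only [pvNoneIds, pvConv, pvBList, zero_add, pvNoneIds_shift t 1, List.foldl_cons]
      have hset : pvStepA2 (m, Sum.inl none :: pvConv t) 0
          = (m + 1, Sum.inr (pvChr (64 + (m + 1))) :: pvConv t) := by
        simp [pvStepA2, PySem.List.pySetD_of_nonneg _ _ (le_refl (0:Int))]
      rw [hset, pvPass2_shift _ (pvNoneIds_nonneg t) (m + 1)]
      simp [ih (m + 1)]

-- B's statistics fold computes A's running max and the None count
theorem pvStats_spec (l : List (Option Int)) : ∀ m k : Int,
    l.foldl pvStats (m, k)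
      = ((l.filterMap id).foldl (fun a r => if r > a then r else a) m,
         k + (l.countP (fun o => o.isNone) : Int)) := by
  induction l with
  | nil => intro m k; simp
  | cons x t ih =>
    intro m k
    cases x with
    | some r => simp [pvStats, ih]
    | none =>
      simp only [List.foldl_cons, pvStats]
      rw [ih]
      simp only [List.filterMap_cons, id, List.countP_cons, Option.isNone_none, if_pos,
        Prod.mk.injEq]
      constructor
      · trivial
      · push_cast; ring

-- B's backward fill, started at m + (#Nones), is the forward-filled list; the counter ends at m
theorem pvBrev_spec (l : List (Option Int)) : ∀ m : Int,
    l.foldr pvStepBrev ([], m + (l.countP (fun o => o.isNone) : Int))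
      = (pvBList m l, m) := by
  induction l with
  | nil => intro m; simp [pvBList]
  | cons x t ih =>
    intro m
    cases x with
    | some r =>
      simp only [List.foldr_cons]
      rw [show m + ((some r :: t).countP (fun o => o.isNone) : Int)
            = m + (t.countP (fun o => o.isNone) : Int) by simp]
      rw [ih m]
      simp [pvStepBrev, pvBList]
    | none =>
      simp only [List.foldr_cons]
      rw [show m + ((none :: t).countP (fun o => o.isNone) : Int)
            = (m + 1) + (t.countP (fun o => o.isNone) : Int) by
          simp; ring]
      rw [ih (m + 1)]
      simp [pvStepBrev, pvBList]

-- ===== VERDICT (by name: the statement is the Claim_ definition above) =====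
theorem fill_in_none_rhymes_py_spec : Claim_equal_fill_in_none_rhymes_py := by
  intro rhymes _ _
  unfold Spec_fill_in_none_rhymes_py fill_in_none_rhymes_py fill_in_none_rhymes_py_alt
  have h0 := pvPass1_spec rhymes [] 0 []
  simp only [List.length_nil, List.nil_append, Nat.cast_zero, zero_add] at h0
  rw [h0]
  simp only []
  rw [pvStats_spec rhymes 0 0]
  simp only [zero_add]
  rw [pvBrev_spec rhymes]
  rw [pvPass2_spec rhymes]
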